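-- pv_equiv track=rewrite | github.com/sinafeizi/M.Sc.-Main-Thesis-Codes-and-Files | ACO.py | remove_extra_pairings
-- ===== SOURCE A (Python) =====
-- def remove_extra_pairings(a_path, list_of_all_pairings):
--     main_counter = 0
--     for i in range(len(a_path)):
--         if a_path[i] == 1:
--             counter1 = 0
--             for j in range(len(list_of_all_pairings[i]) - 1):
--                 counter2 = 0
--                 for k in range(len(a_path)):
--                     if a_path[k] == 1 and k != i:
--                         if list_of_all_pairings[i][j] in list_of_all_pairings[k]:
--                             counter2 += 1
--                 if counter2 >= 1:
--                     counter1 += 1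
--             if counter1 == len(list_of_all_pairings[i]) - 1:
--                 a_path[i] = 0
--                 main_counter += 1
--             else:
--                 pass
--     return a_path
-- ===== SOURCE B (Python) =====
-- def remove_extra_pairings(a_path, list_of_all_pairings):
--     # Count, for each element, how many currently-selected pairings contain it.
--     cnt = {}
--     for i in range(len(a_path)):
--         if a_path[i] == 1:
--             for e in set(list_of_all_pairings[i]):
--                 cnt[e] = cnt.get(e, 0) + 1
--     for i in range(len(a_path)):
--         if a_path[i] == 1:
--             p = list_of_all_pairings[i]
--             if p and all(cnt[e] >= 2 for e in p[:-1]):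
--                 a_path[i] = 0
--                 for e in set(p):
--                     cnt[e] -= 1
--     return a_path
-- ===== Notes on version B (the rewrite author's own statement) =====
-- stated objective: alternative
-- what changed: Instead of, for every selected pairing and every checked element, rescanning all other selected pairings (three nested loops), B precomputes one dict counting for each element how many currently-selected pairings contain it, tests 'count >= 2' per element, and decrements the counts when a pairing is deselected.
import Mathlib
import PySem

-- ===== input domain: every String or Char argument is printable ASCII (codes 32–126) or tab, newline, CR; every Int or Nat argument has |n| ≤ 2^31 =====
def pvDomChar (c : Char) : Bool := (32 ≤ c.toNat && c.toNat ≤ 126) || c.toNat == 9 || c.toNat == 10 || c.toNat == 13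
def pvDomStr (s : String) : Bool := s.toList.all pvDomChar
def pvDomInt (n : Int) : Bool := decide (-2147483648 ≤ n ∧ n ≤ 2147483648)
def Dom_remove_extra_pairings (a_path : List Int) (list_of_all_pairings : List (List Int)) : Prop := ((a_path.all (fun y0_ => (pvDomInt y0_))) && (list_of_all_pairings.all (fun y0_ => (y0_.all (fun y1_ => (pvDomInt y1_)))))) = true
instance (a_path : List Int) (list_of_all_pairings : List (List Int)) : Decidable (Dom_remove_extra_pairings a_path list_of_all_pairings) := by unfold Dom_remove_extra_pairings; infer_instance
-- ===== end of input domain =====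

-- B replaces A's three nested rescanning loops by one element -> selected-pairing-count dict
-- (check count >= 2, decrement on deselection); objective: alternative algorithm.
-- Both A and B mutate a_path in place in the same way; the equivalence proved here is about the return value.

-- ===== PORT A =====
-- one iteration of A's outer 'for i in range(len(a_path))' loop; state = (a_path, main_counter)
def pvAstep (lop : List (List Int)) (st : List Int × Int) (i : Nat) : List Int × Int :=
  if st.1.getD i 0 = 1 then
    -- counter1: 'for j in range(len(list_of_all_pairings[i]) - 1)'
    let c1 : Int := (List.range ((lop.getD i []).length - 1)).foldl (fun c1 j =>
      -- counter2: 'for k in range(len(a_path))'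
      let c2 : Int := (List.range st.1.length).foldl (fun c2 k =>
        if st.1.getD k 0 = 1 ∧ k ≠ i then
          (if (lop.getD i []).getD j 0 ∈ lop.getD k [] then c2 + 1 else c2)
        else c2) 0
      if c2 ≥ 1 then c1 + 1 else c1) 0
    if c1 = ((lop.getD i []).length : Int) - 1 then (st.1.set i 0, st.2 + 1) else st
  else st

def remove_extra_pairings (a_path : List Int) (list_of_all_pairings : List (List Int)) : List Int :=
  ((List.range a_path.length).foldl (pvAstep list_of_all_pairings) (a_path, 0)).1

-- ===== PORT B =====
-- 'cnt': for each element, how many currently-selected pairings contain it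
def pvBcount (a_path : List Int) (lop : List (List Int)) : PySem.Dict Int Int :=
  (List.range a_path.length).foldl (fun cnt i =>
    if a_path.getD i 0 = 1 then
      (PySem.Set.ofList (lop.getD i [])).foldl (fun c e => c.modify e 0 (· + 1)) cnt
    else cnt) PySem.Dict.empty

-- one iteration of B's second loop; state = (a_path, cnt)
def pvBstep (lop : List (List Int)) (st : List Int × PySem.Dict Int Int) (i : Nat) :
    List Int × PySem.Dict Int Int :=
  if st.1.getD i 0 = 1 then
    let p := lop.getD i []
    -- 'if p and all(cnt[e] >= 2 for e in p[:-1])' (cnt[e] exists whenever read; getD is exact there)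
    if p ≠ [] ∧ ∀ e ∈ p.dropLast, 2 ≤ st.2.getD e 0 then
      (st.1.set i 0, (PySem.Set.ofList p).foldl (fun c e => c.modify e 0 (· - 1)) st.2)
    else st
  else st

def remove_extra_pairings_alt (a_path : List Int) (list_of_all_pairings : List (List Int)) : List Int :=
  ((List.range a_path.length).foldl (pvBstep list_of_all_pairings)
    (a_path, pvBcount a_path list_of_all_pairings)).1

-- ===== PRECONDITION & SPEC =====
-- Pre_ excludes exactly the inputs on which Python A raises IndexError: a selected index
-- (a_path[i] == 1) with no pairing at that index (i >= len(list_of_all_pairings)).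
def Pre_remove_extra_pairings (a_path : List Int) (list_of_all_pairings : List (List Int)) : Prop :=
  ∀ i < a_path.length, a_path.getD i 0 = 1 → i < list_of_all_pairings.length
instance (a_path : List Int) (list_of_all_pairings : List (List Int)) : Decidable (Pre_remove_extra_pairings a_path list_of_all_pairings) := by unfold Pre_remove_extra_pairings; infer_instance
def pvWitness_remove_extra_pairings : List Int × List (List Int) := ([1, 1, 0], [[2, 3], [2, 3]])

def Spec_remove_extra_pairings (a_path : List Int) (list_of_all_pairings : List (List Int)) (out : List Int) : Prop := out = remove_extra_pairings_alt a_path list_of_all_pairings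
instance (a_path : List Int) (list_of_all_pairings : List (List Int)) (out : List Int) : Decidable (Spec_remove_extra_pairings a_path list_of_all_pairings out) := by unfold Spec_remove_extra_pairings; infer_instance

-- ===== CLAIM (what is proved, stated in full; the proofs are below) =====
def Claim_equal_remove_extra_pairings : Prop := ∀ (a_path : List Int) (list_of_all_pairings : List (List Int)), Dom_remove_extra_pairings a_path list_of_all_pairings → Pre_remove_extra_pairings a_path list_of_all_pairings → Spec_remove_extra_pairings a_path list_of_all_pairings (remove_extra_pairings a_path list_of_all_pairings)

-- ===== LEMMAS AND PROOFS =====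

-- number of currently-selected pairings (w.r.t. path s) containing element e
def pvC (lop : List (List Int)) (s : List Int) (e : Int) : Nat :=
  (List.range s.length).countP (fun k => decide (s.getD k 0 = 1 ∧ e ∈ lop.getD k []))

lemma pv_count_ofList (p : List Int) (e : Int) :
    ((PySem.Set.ofList p).count e : Int) = if e ∈ p then 1 else 0 := by
  by_cases h : e ∈ p
  · rw [List.count_eq_one_of_mem (PySem.Set.nodup_ofList p) ((PySem.Set.mem_ofList p e).2 h)]
    simp [h]
  · rw [List.count_eq_zero.2 (fun hc => h ((PySem.Set.mem_ofList p e).1 hc))]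
    simp [h]

lemma pv_getD_foldl_modify_sub_one (l : List Int) (d : PySem.Dict Int Int) (v : Int) :
    (l.foldl (fun d x => d.modify x 0 (· - 1)) d).getD v 0 = d.getD v 0 - l.count v := by
  induction l generalizing d with
  | nil => simp
  | cons a t ih =>
    simp only [List.foldl_cons, ih, PySem.Dict.getD_modify, List.count_cons]
    by_cases h : v = a <;> simp [h, beq_iff_eq] <;> omega

-- drop one distinguished index from a count over a nodup list
lemma pv_countP_erase_point {L : List Nat} (hN : L.Nodup) {i : Nat} (hiL : i ∈ L)
    (p q : Nat → Bool) (hpi : p i = true) (hqi : q i = false)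
    (hpq : ∀ k ∈ L, k ≠ i → p k = q k) :
    L.countP p = L.countP q + 1 := by
  induction L with
  | nil => simp at hiL
  | cons a t ih =>
    rcases List.nodup_cons.1 hN with ⟨hat, htN⟩
    simp only [List.countP_cons]
    rcases List.mem_cons.1 hiL with rfl | hit
    · have hcongr : t.countP p = t.countP q :=
        List.countP_congr (fun k hk => by
          rw [hpq k (List.mem_cons_of_mem _ hk) (fun h => hat (h ▸ hk))])
      rw [hcongr, hpi, hqi]
      simp
    · have hai : a ≠ i := fun h => hat (h ▸ hit)
      rw [hpq a (List.mem_cons_self) hai,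
        ih htN hit (fun k hk hki => hpq k (List.mem_cons_of_mem _ hk) hki)]
      omega

lemma pv_lt_of_getD_one {s : List Int} {i : Nat} (h : s.getD i 0 = 1) : i < s.length := by
  by_contra hc
  rw [List.getD_eq_default] at h
  · omega
  · omega

lemma pvC_set (lop : List (List Int)) (s : List Int) (i : Nat)
    (hs : s.getD i 0 = 1) (e : Int) :
    (pvC lop (s.set i 0) e : Int) = (pvC lop s e : Int) - (if e ∈ lop.getD i [] then 1 else 0) := by
  have hi : i < s.length := pv_lt_of_getD_one hs
  have hlen : (s.set i 0).length = s.length := List.length_set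
  have hgd : ∀ k : Nat, (s.set i 0).getD k 0 = if k = i then 0 else s.getD k 0 := by
    intro k
    by_cases hk : k = i
    · subst hk
      simp [List.getD, hi]
    · simp [List.getD, List.getElem?_set_ne (fun h => hk h.symm), hk]
  unfold pvC
  rw [hlen]
  by_cases he : e ∈ lop.getD i []
  · have hstep := pv_countP_erase_point (List.nodup_range)
      (i := i) (List.mem_range.2 hi)
      (fun k => decide (s.getD k 0 = 1 ∧ e ∈ lop.getD k []))
      (fun k => decide ((s.set i 0).getD k 0 = 1 ∧ e ∈ lop.getD k []))
      (decide_eq_true ⟨hs, he⟩)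
      (decide_eq_false (fun h => by
        rw [hgd i, if_pos rfl] at h
        exact absurd h.1 (by norm_num)))
      (fun k _ hki => by beta_reduce; rw [hgd k, if_neg hki])
    rw [if_pos he]
    omega
  · have hcongr : (List.range s.length).countP
        (fun k => decide ((s.set i 0).getD k 0 = 1 ∧ e ∈ lop.getD k [])) =
        (List.range s.length).countP
        (fun k => decide (s.getD k 0 = 1 ∧ e ∈ lop.getD k [])) :=
      List.countP_congr (fun k _ => by
        by_cases hki : k = i
        · subst hki
          rw [hgd k, if_pos rfl]
          simp only [decide_eq_true_eq]
          constructor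
          · rintro ⟨h0, _⟩; exact absurd h0 (by norm_num)
          · rintro ⟨_, hmem⟩; exact absurd hmem he
        · rw [hgd k, if_neg hki])
    rw [if_neg he, hcongr]
    omega

lemma pv_c2_eq (lop : List (List Int)) (s : List Int) (i : Nat)
    (hs : s.getD i 0 = 1) (e : Int) (he : e ∈ lop.getD i []) :
    (List.range s.length).foldl (fun c2 k =>
        if s.getD k 0 = 1 ∧ k ≠ i then
          (if e ∈ lop.getD k [] then c2 + 1 else c2)
        else c2) (0 : Int) = (pvC lop s e : Int) - 1 := by
  have hi : i < s.length := pv_lt_of_getD_one hs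
  have h1 : (List.range s.length).foldl (fun c2 k =>
        if s.getD k 0 = 1 ∧ k ≠ i then
          (if e ∈ lop.getD k [] then c2 + 1 else c2)
        else c2) (0 : Int) =
      (List.range s.length).foldl (fun c2 k =>
        if s.getD k 0 = 1 ∧ k ≠ i ∧ e ∈ lop.getD k [] then c2 + 1 else c2) (0 : Int) := by
    apply PySem.List.foldl_congr_mem
    intro acc k _
    by_cases hc : s.getD k 0 = 1 ∧ k ≠ i
    · rw [if_pos hc]
      by_cases hm : e ∈ lop.getD k []
      · rw [if_pos hm, if_pos ⟨hc.1, hc.2, hm⟩]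
      · rw [if_neg hm, if_neg (fun h => hm h.2.2)]
    · rw [if_neg hc, if_neg (fun h => hc ⟨h.1, h.2.1⟩)]
  rw [h1, PySem.List.foldl_ite_add_one]
  have hstep := pv_countP_erase_point (List.nodup_range)
    (i := i) (List.mem_range.2 hi)
    (fun k => decide (s.getD k 0 = 1 ∧ e ∈ lop.getD k []))
    (fun k => decide (s.getD k 0 = 1 ∧ k ≠ i ∧ e ∈ lop.getD k []))
    (decide_eq_true ⟨hs, he⟩)
    (decide_eq_false (fun h => h.2.1 rfl))
    (fun k _ hki => by
      beta_reduce
      simp only [decide_eq_decide]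
      constructor
      · rintro ⟨h1', h2'⟩; exact ⟨h1', hki, h2'⟩
      · rintro ⟨h1', _, h2'⟩; exact ⟨h1', h2'⟩)
  unfold pvC
  omega

lemma pv_bcount_gen (lop : List (List Int)) (s : List Int) (L : List Nat)
    (d : PySem.Dict Int Int) (e : Int) :
    (L.foldl (fun cnt i =>
      if s.getD i 0 = 1 then
        (PySem.Set.ofList (lop.getD i [])).foldl (fun c x => c.modify x 0 (· + 1)) cnt
      else cnt) d).getD e 0 =
    d.getD e 0 + (L.countP (fun k => decide (s.getD k 0 = 1 ∧ e ∈ lop.getD k [])) : Int) := by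
  induction L generalizing d with
  | nil => simp
  | cons a t ih =>
    rw [List.foldl_cons, List.countP_cons]
    by_cases ha : s.getD a 0 = 1
    · rw [if_pos ha, ih, PySem.Dict.getD_foldl_modify_add_one, pv_count_ofList]
      by_cases hm : e ∈ lop.getD a []
      · rw [if_pos hm]
        simp only [decide_eq_true (⟨ha, hm⟩ : s.getD a 0 = 1 ∧ e ∈ lop.getD a [])]
        push_cast
        ring
      · rw [if_neg hm]
        simp only [decide_eq_false (fun h => hm (h.2) : ¬(s.getD a 0 = 1 ∧ e ∈ lop.getD a []))]
        push_cast
        ring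
    · rw [if_neg ha, ih]
      simp only [decide_eq_false (fun h => ha h.1 : ¬(s.getD a 0 = 1 ∧ e ∈ lop.getD a []))]
      push_cast
      ring

lemma pv_bcount_inv (lop : List (List Int)) (s : List Int) (e : Int) :
    (pvBcount s lop).getD e 0 = (pvC lop s e : Int) := by
  unfold pvBcount pvC
  rw [pv_bcount_gen]
  simp

lemma pv_step_couple (lop : List (List Int)) (s : List Int) (cnt : PySem.Dict Int Int)
    (mc : Int) (i : Nat) (hInv : ∀ e, cnt.getD e 0 = (pvC lop s e : Int)) :
    (pvAstep lop (s, mc) i).1 = (pvBstep lop (s, cnt) i).1 ∧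
    (pvBstep lop (s, cnt) i).1.length = s.length ∧
    ∀ e, (pvBstep lop (s, cnt) i).2.getD e 0 = (pvC lop (pvBstep lop (s, cnt) i).1 e : Int) := by
  unfold pvAstep pvBstep
  by_cases h1 : s.getD i 0 = 1
  · simp only [if_pos h1]
    set p := lop.getD i [] with hp
    -- rewrite A's counter1 using pv_c2_eq
    have h2 : (List.range (p.length - 1)).foldl (fun c1 j =>
        let c2 : Int := (List.range s.length).foldl (fun c2 k =>
          if s.getD k 0 = 1 ∧ k ≠ i then
            (if p.getD j 0 ∈ lop.getD k [] then c2 + 1 else c2)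
          else c2) 0
        if c2 ≥ 1 then c1 + 1 else c1) (0 : Int) =
        (List.range (p.length - 1)).foldl (fun c1 j =>
          if (pvC lop s (p.getD j 0) : Int) - 1 ≥ 1 then c1 + 1 else c1) (0 : Int) := by
      apply PySem.List.foldl_congr_mem
      intro acc j hj
      have hjlt : j < p.length := by
        have := List.mem_range.1 hj
        omega
      have hmem : p.getD j 0 ∈ p := by
        rw [List.getD_eq_getElem p 0 hjlt]
        exact List.getElem_mem hjlt
      rw [pv_c2_eq lop s i h1 (p.getD j 0) (hp ▸ hmem)]
    rw [h2, PySem.List.foldl_ite_add_one]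
    -- the two tests are equivalent
    have hiff : ((0 : Int) + ((List.range (p.length - 1)).countP
          (fun j => decide ((pvC lop s (p.getD j 0) : Int) - 1 ≥ 1)) : Int) =
          (p.length : Int) - 1) ↔
        (p ≠ [] ∧ ∀ e ∈ p.dropLast, 2 ≤ cnt.getD e 0) := by
      rcases eq_or_ne p [] with hnil | hnil
      · rw [hnil]
        simp
      · have hpos : 0 < p.length := List.length_pos_iff.2 hnil
        have hle : (List.range (p.length - 1)).countP
            (fun j => decide ((pvC lop s (p.getD j 0) : Int) - 1 ≥ 1)) ≤ p.length - 1 := by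
          simpa using List.countP_le_length (l := List.range (p.length - 1))
        constructor
        · intro heq
          refine ⟨hnil, fun e hee => ?_⟩
          have hnat : (List.range (p.length - 1)).countP
              (fun j => decide ((pvC lop s (p.getD j 0) : Int) - 1 ≥ 1)) = p.length - 1 := by
            omega
          have hall := (List.countP_eq_length).1 (by rw [hnat, List.length_range])
          obtain ⟨j, hjl, hje⟩ := List.mem_iff_getElem.1 hee
          have hjp : j < p.length - 1 := by
            have := hjl
            rwa [List.length_dropLast] at this
          have := hall j (List.mem_range.2 hjp)
          simp only [decide_eq_true_eq] at this
          have hgd : p.getD j 0 = e := by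
            rw [List.getD_eq_getElem p 0 (by omega), ← List.getElem_dropLast hjl, hje]
          rw [hInv e] at *
          rw [hgd] at this
          omega
        · rintro ⟨-, hall⟩
          have : (List.range (p.length - 1)).countP
              (fun j => decide ((pvC lop s (p.getD j 0) : Int) - 1 ≥ 1)) = p.length - 1 := by
            have hfull : ∀ j ∈ List.range (p.length - 1),
                (fun j => decide ((pvC lop s (p.getD j 0) : Int) - 1 ≥ 1)) j = true := by
              intro j hj
              have hjp : j < p.length - 1 := List.mem_range.1 hj
              have hjl : j < p.dropLast.length := by
                rw [List.length_dropLast]; omega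
              have hmem : p.getD j 0 ∈ p.dropLast := by
                rw [List.getD_eq_getElem p 0 (by omega), ← List.getElem_dropLast hjl]
                exact List.getElem_mem hjl
              have := hall _ hmem
              rw [hInv] at this
              simp only [decide_eq_true_eq]
              omega
            have hlen2 := List.countP_eq_length.2 hfull
            rw [List.length_range] at hlen2
            exact hlen2
          omega
    by_cases hcond : p ≠ [] ∧ ∀ e ∈ p.dropLast, 2 ≤ cnt.getD e 0
    · rw [if_pos (hiff.2 hcond), if_pos hcond]
      refine ⟨rfl, List.length_set, fun e => ?_⟩
      simp only
      rw [pv_getD_foldl_modify_sub_one, hInv e, pvC_set lop s i h1 e]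
      have hc := pv_count_ofList p e
      by_cases hm : e ∈ p
      · rw [if_pos hm] at hc ⊢
        omega
      · rw [if_neg hm] at hc ⊢
        omega
    · rw [if_neg (fun h => hcond (hiff.1 h)), if_neg hcond]
      exact ⟨rfl, rfl, hInv⟩
  · simp only [if_neg h1]
    exact ⟨trivial, trivial, hInv⟩

lemma pv_fold_couple (lop : List (List Int)) (L : List Nat) (s : List Int)
    (cnt : PySem.Dict Int Int) (mc : Int)
    (hInv : ∀ e, cnt.getD e 0 = (pvC lop s e : Int)) :
    (L.foldl (pvAstep lop) (s, mc)).1 = (L.foldl (pvBstep lop) (s, cnt)).1 := by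
  induction L generalizing s cnt mc with
  | nil => rfl
  | cons a t ih =>
    rw [List.foldl_cons, List.foldl_cons]
    obtain ⟨h1, hlen, hInv'⟩ := pv_step_couple lop s cnt mc a hInv
    have hA : pvAstep lop (s, mc) a = ((pvBstep lop (s, cnt) a).1, (pvAstep lop (s, mc) a).2) := by
      rw [← h1]
    rw [hA, show pvBstep lop (s, cnt) a = ((pvBstep lop (s, cnt) a).1, (pvBstep lop (s, cnt) a).2) from rfl]
    exact ih _ _ _ hInv'

-- ===== VERDICT (by name: the statement is the Claim_ definition above) =====
theorem remove_extra_pairings_spec : Claim_equal_remove_extra_pairings := by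
  intro a_path lop _ _
  unfold Spec_remove_extra_pairings remove_extra_pairings remove_extra_pairings_alt
  exact pv_fold_couple lop _ a_path _ 0 (pv_bcount_inv lop a_path)
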